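-- pv_equiv track=rewrite | github.com/evilzip/DirtyPython_HomeWork | Homework7/Ferzi_8.py | ferz_kill_zone
-- ===== SOURCE A (Python) =====
-- def dioganal_squares(position: [int, int]) -> list:
--     # функция выдает координаты диагональных клеток которые поражаются ферзем стоящим на поле position
--     diagonal_list = []
--     i=position[0]
--     j = position[1]
--     while 0 < i < 8 and 0 < j < 8:
--         i+=1
--         j+=1
--         diagonal_list.append([i,j])
--     i = position[0]
--     j = position[1]
--     while 1<i<9 and 1<j<9:
--         i-=1
--         j-=1
--         diagonal_list.append([i,j])
--     i = position[0]
--     j = position[1]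
--     while 0<i<8 and 1<j<9:
--         i+=1
--         j-=1
--         diagonal_list.append([i,j])
--     i = position[0]
--     j = position[1]
--     while 1<i<9 and 0<j<8:
--         i-=1
--         j+=1
--         diagonal_list.append([i,j])
--     return diagonal_list
--
-- def ferz_kill_zone( ferz_position: [int, int], current_desk: list ) -> list:
--     # функция заменяет на [0,0] координаты тех клеток  доски которые поражаются ферзем на клетке ferz_position
--     list1 = []
--     list1 = list(filter(lambda x: x[0] == ferz_position[0], current_desk))
--     list1 = list1 + list(filter(lambda x: x[1] == ferz_position[1], current_desk))
--     list1 = list1 + list(filter(lambda x: x in dioganal_squares(ferz_position), current_desk))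
--     for i in range(len(current_desk)):
--         if current_desk[i] in list1:
--             current_desk[i] = [0,0]
--     return current_desk
-- ===== SOURCE B (Python) =====
-- def ferz_kill_zone(ferz_position, current_desk):
--     # Single pass over the board; the queen's diagonal squares on the 8x8
--     # board (files/ranks 1..8) are computed once as a set. Mutates
--     # current_desk in place and returns it.
--     fr = ferz_position[0]
--     fc = ferz_position[1]
--     diagonal = set()
--     if 1 <= fr <= 8 and 1 <= fc <= 8:
--         diagonal = {(r, c)
--                     for r in range(1, 9) for c in range(1, 9)
--                     if abs(r - fr) == abs(c - fc) and (r, c) != (fr, fc)}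
--     for i, cell in enumerate(current_desk):
--         if cell[0] == fr or cell[1] == fc or tuple(cell) in diagonal:
--             current_desk[i] = [0, 0]
--     return current_desk
-- ===== Notes on version B (the rewrite author's own statement) =====
-- stated objective: simpler
-- what changed: Replaced A's three filter passes plus a diagonal list rebuilt for every cell with one diagonal-square set built once over the 8x8 board and a single pass testing row/column equality and set membership; Pre_ excludes only inputs where indexing a too-short ferz_position or cell raises IndexError (with an empty desk A's lambdas never run, so A still returns [] for a short ferz_position while B raises).
-- outside the precondition, e.g. on ferz_kill_zone([], []): A returns [], B raises IndexError
import Mathlib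
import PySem

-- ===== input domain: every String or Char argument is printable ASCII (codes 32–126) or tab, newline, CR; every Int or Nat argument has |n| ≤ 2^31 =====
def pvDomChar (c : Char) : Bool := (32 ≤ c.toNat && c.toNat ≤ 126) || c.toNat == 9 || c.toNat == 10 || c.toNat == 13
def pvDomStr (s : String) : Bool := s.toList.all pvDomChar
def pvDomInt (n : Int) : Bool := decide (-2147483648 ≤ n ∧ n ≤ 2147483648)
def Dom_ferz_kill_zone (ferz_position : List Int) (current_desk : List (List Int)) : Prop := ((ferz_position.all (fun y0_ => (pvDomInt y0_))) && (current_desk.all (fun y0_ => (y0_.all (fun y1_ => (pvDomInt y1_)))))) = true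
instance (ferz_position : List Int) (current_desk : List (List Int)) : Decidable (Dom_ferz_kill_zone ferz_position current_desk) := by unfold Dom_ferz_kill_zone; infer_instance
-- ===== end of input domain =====

-- B replaces A's three filter passes (with a per-cell rebuild of the diagonal list) by one
-- diagonal-square set built once plus a single pass; equivalence is about the RETURN value
-- (both Pythons also mutate current_desk in place in the same way).

-- ===== PORT A =====
-- first while loop of dioganal_squares: up-right
def fkzLoop1 (i j : Int) (acc : List (List Int)) : List (List Int) :=
  if 0 < i ∧ i < 8 ∧ 0 < j ∧ j < 8 then
    fkzLoop1 (i + 1) (j + 1) (acc ++ [[i + 1, j + 1]])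
  else acc
termination_by (8 - i).toNat
decreasing_by omega

-- second while loop: down-left
def fkzLoop2 (i j : Int) (acc : List (List Int)) : List (List Int) :=
  if 1 < i ∧ i < 9 ∧ 1 < j ∧ j < 9 then
    fkzLoop2 (i - 1) (j - 1) (acc ++ [[i - 1, j - 1]])
  else acc
termination_by (i - 1).toNat
decreasing_by omega

-- third while loop: down-right (i up, j down)
def fkzLoop3 (i j : Int) (acc : List (List Int)) : List (List Int) :=
  if 0 < i ∧ i < 8 ∧ 1 < j ∧ j < 9 then
    fkzLoop3 (i + 1) (j - 1) (acc ++ [[i + 1, j - 1]])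
  else acc
termination_by (8 - i).toNat
decreasing_by omega

-- fourth while loop: up-left (i down, j up)
def fkzLoop4 (i j : Int) (acc : List (List Int)) : List (List Int) :=
  if 1 < i ∧ i < 9 ∧ 0 < j ∧ j < 8 then
    fkzLoop4 (i - 1) (j + 1) (acc ++ [[i - 1, j + 1]])
  else acc
termination_by (i - 1).toNat
decreasing_by omega

-- position[0]/position[1]: Pre_ guarantees the indices exist, so .getD 0 is exact there
def dioganal_squares (position : List Int) : List (List Int) :=
  let i := (PySem.List.pyGet? position 0).getD 0
  let j := (PySem.List.pyGet? position 1).getD 0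
  fkzLoop4 i j (fkzLoop3 i j (fkzLoop2 i j (fkzLoop1 i j [])))

def ferz_kill_zone (ferz_position : List Int) (current_desk : List (List Int)) : List (List Int) :=
  let f0 := (PySem.List.pyGet? ferz_position 0).getD 0
  let f1 := (PySem.List.pyGet? ferz_position 1).getD 0
  let list1 := current_desk.filter (fun x => (PySem.List.pyGet? x 0).getD 0 == f0)
  let list1 := list1 ++ current_desk.filter (fun x => (PySem.List.pyGet? x 1).getD 0 == f1)
  let list1 := list1 ++ current_desk.filter (fun x => (dioganal_squares ferz_position).contains x)
  -- final loop: element-wise in-place replacement; list1 holds the original cell values,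
  -- so earlier replacements never affect later membership tests
  current_desk.map (fun c => if list1.contains c then [0, 0] else c)

-- ===== PORT B =====
-- Source B's set comprehension {(r,c) for r in range(1,9) for c in range(1,9) if ...};
-- the pairs produced are pairwise distinct, so a plain list models the set exactly,
-- with 'tuple(cell) in diagonal' becoming list membership of the pair [r, c]
def altDiagonal (fr fc : Int) : List (List Int) :=
  if 1 ≤ fr ∧ fr ≤ 8 ∧ 1 ≤ fc ∧ fc ≤ 8 then
    (PySem.List.pyRange 1 9 1).flatMap (fun r =>
      ((PySem.List.pyRange 1 9 1).filter
        (fun c => ((r - fr).natAbs == (c - fc).natAbs) && !(r == fr && c == fc))).map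
        (fun c => [r, c]))
  else []

def ferz_kill_zone_alt (ferz_position : List Int) (current_desk : List (List Int)) : List (List Int) :=
  let fr := (PySem.List.pyGet? ferz_position 0).getD 0
  let fc := (PySem.List.pyGet? ferz_position 1).getD 0
  let diagonal := altDiagonal fr fc
  current_desk.map (fun cell =>
    if (PySem.List.pyGet? cell 0).getD 0 = fr ∨ (PySem.List.pyGet? cell 1).getD 0 = fc ∨
        diagonal.contains cell
    then [0, 0] else cell)

-- ===== PRECONDITION & SPEC =====
-- Pre_ excludes exactly the inputs where indexing raises IndexError: ferz_position or
-- some board cell shorter than 2 (A raises there too, except that with an EMPTY desk A's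
-- lambdas never run and A still returns [] for a short ferz_position, while B reads
-- ferz_position eagerly and raises).
def Pre_ferz_kill_zone (ferz_position : List Int) (current_desk : List (List Int)) : Prop :=
  2 ≤ ferz_position.length ∧ ∀ c ∈ current_desk, 2 ≤ c.length
instance (ferz_position : List Int) (current_desk : List (List Int)) : Decidable (Pre_ferz_kill_zone ferz_position current_desk) := by unfold Pre_ferz_kill_zone; infer_instance

def pvWitness_ferz_kill_zone : List Int × List (List Int) :=
  ([4, 4], [[4, 7], [2, 2], [3, 5], [1, 4], [0, 0], [9, 9]])

def Spec_ferz_kill_zone (ferz_position : List Int) (current_desk : List (List Int)) (out : List (List Int)) : Prop := out = ferz_kill_zone_alt ferz_position current_desk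
instance (ferz_position : List Int) (current_desk : List (List Int)) (out : List (List Int)) : Decidable (Spec_ferz_kill_zone ferz_position current_desk out) := by unfold Spec_ferz_kill_zone; infer_instance

-- ===== CLAIM (what is proved, stated in full; the proofs are below) =====
def Claim_equal_ferz_kill_zone : Prop := ∀ (ferz_position : List Int) (current_desk : List (List Int)), Dom_ferz_kill_zone ferz_position current_desk → Pre_ferz_kill_zone ferz_position current_desk → Spec_ferz_kill_zone ferz_position current_desk (ferz_kill_zone ferz_position current_desk)

-- ===== LEMMAS AND PROOFS =====

theorem mem_fkzLoop1 (i j : Int) (acc : List (List Int)) (c : List Int) :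
    c ∈ fkzLoop1 i j acc ↔ c ∈ acc ∨
      ∃ a b : Int, c = [a, b] ∧ 0 < i ∧ 0 < j ∧ a - i = b - j ∧ i < a ∧ a ≤ 8 ∧ b ≤ 8 := by
  induction i, j, acc using fkzLoop1.induct with
  | case1 i j acc h ih =>
    rw [fkzLoop1.eq_def, if_pos h, ih]
    simp only [List.mem_append, List.mem_singleton, or_assoc]
    constructor
    · rintro (hc | hc | ⟨a, b, rfl, h1, h2, h3, h4, h5, h6⟩)
      · exact Or.inl hc
      · exact Or.inr ⟨i + 1, j + 1, hc, by omega⟩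
      · exact Or.inr ⟨a, b, rfl, by omega⟩
    · rintro (hc | ⟨a, b, rfl, h1, h2, h3, h4, h5, h6⟩)
      · exact Or.inl hc
      · by_cases ha : a = i + 1
        · subst ha; have : b = j + 1 := by omega
          subst this; exact Or.inr (Or.inl rfl)
        · exact Or.inr (Or.inr ⟨a, b, rfl, by omega⟩)
  | case2 i j acc h =>
    rw [fkzLoop1.eq_def, if_neg h]
    constructor
    · exact Or.inl
    · rintro (hc | ⟨a, b, rfl, h1, h2, h3, h4, h5, h6⟩)
      · exact hc
      · exact absurd ⟨h1, by omega, h2, by omega⟩ h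

theorem mem_fkzLoop2 (i j : Int) (acc : List (List Int)) (c : List Int) :
    c ∈ fkzLoop2 i j acc ↔ c ∈ acc ∨
      ∃ a b : Int, c = [a, b] ∧ i < 9 ∧ j < 9 ∧ i - a = j - b ∧ a < i ∧ 1 ≤ a ∧ 1 ≤ b := by
  induction i, j, acc using fkzLoop2.induct with
  | case1 i j acc h ih =>
    rw [fkzLoop2.eq_def, if_pos h, ih]
    simp only [List.mem_append, List.mem_singleton, or_assoc]
    constructor
    · rintro (hc | hc | ⟨a, b, rfl, h1, h2, h3, h4, h5, h6⟩)
      · exact Or.inl hc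
      · exact Or.inr ⟨i - 1, j - 1, hc, by omega⟩
      · exact Or.inr ⟨a, b, rfl, by omega⟩
    · rintro (hc | ⟨a, b, rfl, h1, h2, h3, h4, h5, h6⟩)
      · exact Or.inl hc
      · by_cases ha : a = i - 1
        · subst ha; have : b = j - 1 := by omega
          subst this; exact Or.inr (Or.inl rfl)
        · exact Or.inr (Or.inr ⟨a, b, rfl, by omega⟩)
  | case2 i j acc h =>
    rw [fkzLoop2.eq_def, if_neg h]
    constructor
    · exact Or.inl
    · rintro (hc | ⟨a, b, rfl, h1, h2, h3, h4, h5, h6⟩)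
      · exact hc
      · exact absurd ⟨by omega, h1, by omega, h2⟩ h

theorem mem_fkzLoop3 (i j : Int) (acc : List (List Int)) (c : List Int) :
    c ∈ fkzLoop3 i j acc ↔ c ∈ acc ∨
      ∃ a b : Int, c = [a, b] ∧ 0 < i ∧ j < 9 ∧ a - i = j - b ∧ i < a ∧ a ≤ 8 ∧ 1 ≤ b := by
  induction i, j, acc using fkzLoop3.induct with
  | case1 i j acc h ih =>
    rw [fkzLoop3.eq_def, if_pos h, ih]
    simp only [List.mem_append, List.mem_singleton, or_assoc]
    constructor
    · rintro (hc | hc | ⟨a, b, rfl, h1, h2, h3, h4, h5, h6⟩)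
      · exact Or.inl hc
      · exact Or.inr ⟨i + 1, j - 1, hc, by omega⟩
      · exact Or.inr ⟨a, b, rfl, by omega⟩
    · rintro (hc | ⟨a, b, rfl, h1, h2, h3, h4, h5, h6⟩)
      · exact Or.inl hc
      · by_cases ha : a = i + 1
        · subst ha; have : b = j - 1 := by omega
          subst this; exact Or.inr (Or.inl rfl)
        · exact Or.inr (Or.inr ⟨a, b, rfl, by omega⟩)
  | case2 i j acc h =>
    rw [fkzLoop3.eq_def, if_neg h]
    constructor
    · exact Or.inl
    · rintro (hc | ⟨a, b, rfl, h1, h2, h3, h4, h5, h6⟩)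
      · exact hc
      · exact absurd ⟨h1, by omega, by omega, h2⟩ h

theorem mem_fkzLoop4 (i j : Int) (acc : List (List Int)) (c : List Int) :
    c ∈ fkzLoop4 i j acc ↔ c ∈ acc ∨
      ∃ a b : Int, c = [a, b] ∧ i < 9 ∧ 0 < j ∧ i - a = b - j ∧ a < i ∧ 1 ≤ a ∧ b ≤ 8 := by
  induction i, j, acc using fkzLoop4.induct with
  | case1 i j acc h ih =>
    rw [fkzLoop4.eq_def, if_pos h, ih]
    simp only [List.mem_append, List.mem_singleton, or_assoc]
    constructor
    · rintro (hc | hc | ⟨a, b, rfl, h1, h2, h3, h4, h5, h6⟩)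
      · exact Or.inl hc
      · exact Or.inr ⟨i - 1, j + 1, hc, by omega⟩
      · exact Or.inr ⟨a, b, rfl, by omega⟩
    · rintro (hc | ⟨a, b, rfl, h1, h2, h3, h4, h5, h6⟩)
      · exact Or.inl hc
      · by_cases ha : a = i - 1
        · subst ha; have : b = j + 1 := by omega
          subst this; exact Or.inr (Or.inl rfl)
        · exact Or.inr (Or.inr ⟨a, b, rfl, by omega⟩)
  | case2 i j acc h =>
    rw [fkzLoop4.eq_def, if_neg h]
    constructor
    · exact Or.inl
    · rintro (hc | ⟨a, b, rfl, h1, h2, h3, h4, h5, h6⟩)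
      · exact hc
      · exact absurd ⟨by omega, h1, h2, by omega⟩ h

-- closed form for A's diagonal list: pairs on a diagonal of the queen, both on the 1..8 board
theorem mem_dioganal_squares (position : List Int) (c : List Int) :
    c ∈ dioganal_squares position ↔
      ∃ a b : Int, c = [a, b] ∧
        (let f0 := (PySem.List.pyGet? position 0).getD 0
         let f1 := (PySem.List.pyGet? position 1).getD 0
         1 ≤ f0 ∧ f0 ≤ 8 ∧ 1 ≤ f1 ∧ f1 ≤ 8 ∧ a ≠ f0 ∧
         (a - f0).natAbs = (b - f1).natAbs ∧ 1 ≤ a ∧ a ≤ 8 ∧ 1 ≤ b ∧ b ≤ 8) := by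
  unfold dioganal_squares
  rw [mem_fkzLoop4, mem_fkzLoop3, mem_fkzLoop2, mem_fkzLoop1]
  simp only [List.not_mem_nil, false_or]
  constructor
  · rintro (((⟨a, b, rfl, h⟩ | ⟨a, b, rfl, h⟩) | ⟨a, b, rfl, h⟩) | ⟨a, b, rfl, h⟩) <;>
      exact ⟨a, b, rfl, by omega⟩
  · rintro ⟨a, b, rfl, h1, h2, h3, h4, h5, h6, h7, h8, h9, h10⟩
    by_cases hab : (let f0 := (PySem.List.pyGet? position 0).getD 0; a < f0)
    · by_cases hbd : (let f1 := (PySem.List.pyGet? position 1).getD 0; b < f1)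
      · exact Or.inl (Or.inl (Or.inr ⟨a, b, rfl, by omega⟩))
      · exact Or.inr ⟨a, b, rfl, by omega⟩
    · by_cases hbd : (let f1 := (PySem.List.pyGet? position 1).getD 0; b < f1)
      · exact Or.inl (Or.inr ⟨a, b, rfl, by omega⟩)
      · exact Or.inl (Or.inl (Or.inl ⟨a, b, rfl, by omega⟩))

-- closed form for B's diagonal set (as a list of pairs)
theorem mem_altDiagonal (fr fc : Int) (c : List Int) :
    c ∈ altDiagonal fr fc ↔
      ∃ a b : Int, c = [a, b] ∧
        1 ≤ fr ∧ fr ≤ 8 ∧ 1 ≤ fc ∧ fc ≤ 8 ∧ a ≠ fr ∧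
        (a - fr).natAbs = (b - fc).natAbs ∧ 1 ≤ a ∧ a ≤ 8 ∧ 1 ≤ b ∧ b ≤ 8 := by
  unfold altDiagonal
  have hrange : PySem.List.pyRange 1 9 1 = ([1, 2, 3, 4, 5, 6, 7, 8] : List Int) := by decide
  split_ifs with hq
  · rw [hrange]
    simp only [List.mem_flatMap, List.mem_map, List.mem_filter, Bool.and_eq_true,
      beq_iff_eq, Bool.not_eq_true', Bool.and_eq_false_iff, beq_eq_false_iff_ne, ne_eq,
      List.mem_cons, List.not_mem_nil, or_false]
    constructor
    · rintro ⟨r, hr, cc, ⟨⟨hcc, habs, hne⟩, rfl⟩⟩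
      exact ⟨r, cc, rfl, hq.1, hq.2.1, hq.2.2.1, hq.2.2.2, by omega, habs,
        by omega, by omega, by omega, by omega⟩
    · rintro ⟨a, b, rfl, _, _, _, _, hne, habs, ha1, ha8, hb1, hb8⟩
      exact ⟨a, by omega, b, ⟨⟨by omega, habs, by omega⟩, rfl⟩⟩
  · simp only [List.not_mem_nil, false_iff]
    rintro ⟨a, b, _, h1, h2, h3, h4, _⟩
    exact hq ⟨h1, h2, h3, h4⟩

-- B's diagonal set holds exactly the members of A's diagonal list
theorem altDiagonal_eq_mem (position : List Int) (c : List Int) :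
    c ∈ altDiagonal ((PySem.List.pyGet? position 0).getD 0)
        ((PySem.List.pyGet? position 1).getD 0) ↔ c ∈ dioganal_squares position := by
  rw [mem_altDiagonal, mem_dioganal_squares]

theorem ferz_kill_zone_spec : Claim_equal_ferz_kill_zone := by
  intro fp desk _hdom _hpre
  unfold Spec_ferz_kill_zone ferz_kill_zone ferz_kill_zone_alt
  simp only []
  apply List.map_congr_left
  intro c hc
  have hmem : ((desk.filter (fun x => (PySem.List.pyGet? x 0).getD 0 == (PySem.List.pyGet? fp 0).getD 0) ++
        desk.filter (fun x => (PySem.List.pyGet? x 1).getD 0 == (PySem.List.pyGet? fp 1).getD 0) ++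
        desk.filter (fun x => (dioganal_squares fp).contains x)).contains c = true) ↔
      ((PySem.List.pyGet? c 0).getD 0 = (PySem.List.pyGet? fp 0).getD 0 ∨
       (PySem.List.pyGet? c 1).getD 0 = (PySem.List.pyGet? fp 1).getD 0 ∨
       (altDiagonal ((PySem.List.pyGet? fp 0).getD 0) ((PySem.List.pyGet? fp 1).getD 0)).contains c = true) := by
    simp only [List.contains_iff_mem, List.mem_append, List.mem_filter, beq_iff_eq,
      altDiagonal_eq_mem]
    constructor
    · rintro ((⟨_, h⟩ | ⟨_, h⟩) | ⟨_, h⟩)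
      · exact Or.inl h
      · exact Or.inr (Or.inl h)
      · exact Or.inr (Or.inr h)
    · rintro (h | h | h)
      · exact Or.inl (Or.inl ⟨hc, h⟩)
      · exact Or.inl (Or.inr ⟨hc, h⟩)
      · exact Or.inr ⟨hc, h⟩
  by_cases hm : ((desk.filter (fun x => (PySem.List.pyGet? x 0).getD 0 == (PySem.List.pyGet? fp 0).getD 0) ++
        desk.filter (fun x => (PySem.List.pyGet? x 1).getD 0 == (PySem.List.pyGet? fp 1).getD 0) ++
        desk.filter (fun x => (dioganal_squares fp).contains x)).contains c = true)
  · rw [if_pos hm, if_pos (hmem.mp hm)]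
  · rw [if_neg hm, if_neg (fun h => hm (hmem.mpr h))]
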